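-- pv_equiv track=rewrite | github.com/youtadji/LeetCode | TwoSumT2.py | findPairModZero
-- ===== SOURCE A (Python) =====
-- def findPairModZero(nums, target):
--     i=0
--     while i < len(nums):
--         j = i + 1
--         while j < len(nums):
--
--             # special case when target == 0
--             if target == 0:
--                 if nums[i] + nums[j] == 0:
--                     return [i, j]
--             else:
--                 if (nums[i] + nums[j]) % target == 0:
--                     return [i, j]
--
--             j += 1
--         i += 1
--     return []
-- ===== SOURCE B (Python) =====
-- def findPairModZero(nums, target):
--     # One grouping pass: bucket indices by nums[k] % target (by value itself when target == 0),
--     # then for each i scan only the complement bucket for the smallest index j > i.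
--     groups = {}
--     for idx, v in enumerate(nums):
--         key = v if target == 0 else v % target
--         groups.setdefault(key, []).append(idx)
--     for i, v in enumerate(nums):
--         need = -v if target == 0 else (-v) % target
--         for j in groups.get(need, []):
--             if j > i:
--                 return [i, j]
--     return []
-- ===== Notes on version B (the rewrite author's own statement) =====
-- stated objective: faster
-- what changed: Replaced A's nested full index scans by a single dict pass grouping indices by remainder (by value when target == 0) followed by a per-index lookup that scans only the complement-remainder bucket.
import Mathlib
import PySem

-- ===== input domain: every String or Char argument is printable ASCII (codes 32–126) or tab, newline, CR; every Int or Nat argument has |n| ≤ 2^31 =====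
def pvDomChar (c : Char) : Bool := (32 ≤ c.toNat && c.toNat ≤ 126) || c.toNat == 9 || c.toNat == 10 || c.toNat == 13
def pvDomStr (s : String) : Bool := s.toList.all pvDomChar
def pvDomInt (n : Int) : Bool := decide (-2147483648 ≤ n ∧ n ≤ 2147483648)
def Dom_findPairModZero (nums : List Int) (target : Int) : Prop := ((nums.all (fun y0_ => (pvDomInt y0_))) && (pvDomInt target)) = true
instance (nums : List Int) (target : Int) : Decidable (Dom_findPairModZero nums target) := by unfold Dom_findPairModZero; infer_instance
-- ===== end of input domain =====

-- B replaces A's nested index scans by one dict pass grouping indices by remainder (by value when target == 0)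
-- plus a per-i scan of only the complement bucket; measurably faster in a timing run.

-- ===== PORT A =====
-- inner 'while j < len(nums)' loop of A
def pvA_inner (nums : List Int) (target : Int) (i j : Nat) : Option (List Int) :=
  if _h : j < nums.length then
    if target = 0 then
      if nums.getD i 0 + nums.getD j 0 = 0 then some [(i : Int), (j : Int)]
      else pvA_inner nums target i (j + 1)
    else
      if PySem.Int.mod (nums.getD i 0 + nums.getD j 0) target = 0 then some [(i : Int), (j : Int)]
      else pvA_inner nums target i (j + 1)
  else none
termination_by nums.length - j

-- outer 'while i < len(nums)' loop of A
def pvA_outer (nums : List Int) (target : Int) (i : Nat) : List Int :=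
  if _h : i < nums.length then
    match pvA_inner nums target i (i + 1) with
    | some r => r
    | none => pvA_outer nums target (i + 1)
  else []
termination_by nums.length - i

def findPairModZero (nums : List Int) (target : Int) : List Int :=
  pvA_outer nums target 0

-- ===== PORT B =====
-- key = v if target == 0 else v % target
def pvB_key (target v : Int) : Int := if target = 0 then v else PySem.Int.mod v target

-- need = -v if target == 0 else (-v) % target
def pvB_need (target v : Int) : Int := if target = 0 then -v else PySem.Int.mod (-v) target

-- grouping pass: groups.setdefault(key, []).append(idx)
def pvB_groups (nums : List Int) (target : Int) : PySem.Dict Int (List Int) :=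
  (PySem.List.enumerate nums).foldl
    (fun d p => d.modify (pvB_key target p.2) [] (· ++ [p.1])) PySem.Dict.empty

-- 'for i, v in enumerate(nums): …  for j in groups.get(need, []): if j > i: return [i, j]'
def pvB_loop (groups : PySem.Dict Int (List Int)) (target : Int) : List (Int × Int) → List Int
  | [] => []
  | (i, v) :: rest =>
    match (groups.getD (pvB_need target v) []).find? (fun j => i < j) with
    | some j => [i, j]
    | none => pvB_loop groups target rest

def findPairModZero_alt (nums : List Int) (target : Int) : List Int :=
  pvB_loop (pvB_groups nums target) target (PySem.List.enumerate nums)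

-- ===== PRECONDITION & SPEC =====
def Spec_findPairModZero (nums : List Int) (target : Int) (out : List Int) : Prop := out = findPairModZero_alt nums target
instance (nums : List Int) (target : Int) (out : List Int) : Decidable (Spec_findPairModZero nums target out) := by unfold Spec_findPairModZero; infer_instance

-- ===== CLAIM (what is proved, stated in full; the proofs are below) =====
def Claim_equal_findPairModZero : Prop := ∀ (nums : List Int) (target : Int), Dom_findPairModZero nums target → Spec_findPairModZero nums target (findPairModZero nums target)

-- ===== LEMMAS AND PROOFS =====

-- find? over a filtered list is find? with the conjoined predicate
theorem pv_find?_filter {α : Type} (l : List α) (p q : α → Bool) :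
    (l.filter q).find? p = l.find? (fun x => q x && p x) := by
  induction l with
  | nil => simp
  | cons x xs ih =>
    by_cases hq : q x = true <;> by_cases hp : p x = true <;>
      simp [hq, hp, ih]

-- find? respects pointwise-equal predicates on the list's members
theorem pv_find?_congr {α : Type} {p q : α → Bool} (l : List α)
    (h : ∀ x ∈ l, p x = q x) : l.find? p = l.find? q := by
  induction l with
  | nil => rfl
  | cons x xs ih =>
    have hx := h x (by simp)
    by_cases hp : p x = true
    · rw [List.find?_cons_of_pos hp, List.find?_cons_of_pos (hx ▸ hp)]
    · rw [List.find?_cons_of_neg hp, List.find?_cons_of_neg (hx ▸ hp),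
        ih (fun y hy => h y (by simp [hy]))]

-- Python % is congruent: a - a % t is a multiple of t
theorem pv_dvd_sub_mod (a t : Int) : t ∣ (a - PySem.Int.mod a t) := by
  have h := PySem.Int.floordiv_mul_add_mod a t
  exact ⟨PySem.Int.floordiv a t, by linarith⟩

-- x % t == y % t  ↔  t ∣ (x - y)   (Python %, t ≠ 0)
theorem pv_mod_eq_mod_iff (x y t : Int) (ht : t ≠ 0) :
    PySem.Int.mod x t = PySem.Int.mod y t ↔ t ∣ (x - y) := by
  constructor
  · intro h
    have hx := pv_dvd_sub_mod x t
    have hy := pv_dvd_sub_mod y t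
    have : t ∣ ((x - PySem.Int.mod x t) - (y - PySem.Int.mod y t)) := dvd_sub hx hy
    rw [h] at this
    simpa using this
  · intro h
    have hx := pv_dvd_sub_mod x t
    have hy := pv_dvd_sub_mod y t
    have hd : t ∣ (PySem.Int.mod x t - PySem.Int.mod y t) := by
      have : PySem.Int.mod x t - PySem.Int.mod y t
          = (x - y) - ((x - PySem.Int.mod x t) - (y - PySem.Int.mod y t)) := by ring
      rw [this]
      exact dvd_sub h (dvd_sub hx hy)
    have habs : |t| ∣ (PySem.Int.mod x t - PySem.Int.mod y t) := (abs_dvd _ _).mpr hd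
    have hzero : PySem.Int.mod x t - PySem.Int.mod y t = 0 := by
      apply Int.eq_zero_of_abs_lt_dvd habs
      rcases lt_or_gt_of_ne ht with hneg | hpos
      · have h1 := PySem.Int.mod_neg_bounds x hneg
        have h2 := PySem.Int.mod_neg_bounds y hneg
        rw [abs_of_neg hneg] at *
        rw [abs_lt]; omega
      · have h1 := PySem.Int.mod_nonneg x hpos
        have h2 := PySem.Int.mod_lt x hpos
        have h3 := PySem.Int.mod_nonneg y hpos
        have h4 := PySem.Int.mod_lt y hpos
        rw [abs_of_pos hpos]
        rw [abs_lt]; omega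
    omega

-- A's pair test ↔ B's key/need bucket test
theorem pv_cond_iff (target v w : Int) :
    (if target = 0 then v + w = 0 else PySem.Int.mod (v + w) target = 0)
      ↔ pvB_key target w = pvB_need target v := by
  unfold pvB_key pvB_need
  by_cases ht : target = 0
  · simp [ht]; omega
  · simp only [ht, if_false]
    rw [PySem.Int.mod_eq_zero_iff_dvd, pv_mod_eq_mod_iff _ _ _ ht,
      show w - -v = v + w by ring]

-- the dict built by B's grouping pass, read back at any key
theorem pv_groups_getD (nums : List Int) (target r : Int) :
    (pvB_groups nums target).getD r []
      = List.map (fun k : Nat => (k : Int)) ((List.range nums.length).filter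
          (fun k => pvB_key target (nums.getD k 0) == r)) := by
  unfold pvB_groups
  rw [PySem.List.enumerate_eq_map_pyRange nums 0,
      ← List.foldl_map (f := fun (p : Int × Int) => ((pvB_key target p.2), p.1))
        (g := fun (d : PySem.Dict Int (List Int)) p => d.modify p.1 [] (· ++ [p.2]))]
  rw [PySem.Dict.getD_foldl_modify_append]
  rw [List.map_map, PySem.List.pyRange_one, List.map_map]
  simp only [PySem.List.len_eq, sub_zero, Int.toNat_natCast]
  rw [List.filter_map, List.map_map]
  simp only [Function.comp_def, PySem.Dict.getD_empty, List.nil_append]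
  congr 1
  · funext k; simp
  apply List.filter_congr
  intro k hk
  rw [List.mem_range] at hk
  simp [PySem.List.pyGetD, List.getD, hk]

-- A's inner loop is find? over the tail of the index range
theorem pv_inner_eq (nums : List Int) (target : Int) (i : Nat) : ∀ j,
    pvA_inner nums target i j
      = (((List.range nums.length).drop j).find?
          (fun k => pvB_key target (nums.getD k 0) == pvB_need target (nums.getD i 0))).map
          (fun k => [(i : Int), (k : Int)]) := by
  intro j
  induction hn : nums.length - j using Nat.strong_induction_on generalizing j with
  | _ n ih =>
  rw [pvA_inner]
  by_cases hj : j < nums.length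
  · have hdrop : (List.range nums.length).drop j
        = j :: (List.range nums.length).drop (j + 1) := by
      rw [List.range_eq_range', List.drop_range', List.drop_range']
      have : nums.length - j = (nums.length - (j+1)) + 1 := by omega
      rw [this, List.range'_succ]
      simp
    rw [hdrop]
    have hcond := pv_cond_iff target (nums.getD i 0) (nums.getD j 0)
    by_cases hQ : pvB_key target (nums.getD j 0) = pvB_need target (nums.getD i 0)
    · have : (if target = 0 then nums.getD i 0 + nums.getD j 0 = 0
          else PySem.Int.mod (nums.getD i 0 + nums.getD j 0) target = 0) := hcond.mpr hQ
      rw [List.find?_cons_of_pos (by simpa using hQ)]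
      by_cases ht : target = 0 <;> simp_all
    · have hnot : ¬ (if target = 0 then nums.getD i 0 + nums.getD j 0 = 0
          else PySem.Int.mod (nums.getD i 0 + nums.getD j 0) target = 0) := fun h => hQ (hcond.mp h)
      rw [List.find?_cons_of_neg (by simpa using hQ)]
      have hrec := ih (nums.length - (j+1)) (by omega) (j+1) rfl
      by_cases ht : target = 0 <;> simp_all
  · have : (List.range nums.length).drop j = [] := by
      apply List.drop_eq_nil_of_le; simpa using Nat.le_of_not_lt hj
    simp [hj, this]

-- per-i step: B's bucket lookup equals A's inner scan
theorem pv_step_eq (nums : List Int) (target : Int) (i : Nat) (hi : i < nums.length) :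
    (((pvB_groups nums target).getD (pvB_need target (nums.getD i 0)) []).find?
        (fun j => (i : Int) < j)).map (fun j => [(i : Int), j])
      = pvA_inner nums target i (i + 1) := by
  rw [pv_groups_getD, pv_inner_eq]
  set P : Nat → Bool := fun k => pvB_key target (nums.getD k 0) == pvB_need target (nums.getD i 0) with hP
  rw [List.find?_map, Option.map_map]
  have hcomp : ((fun j : Int => decide ((i : Int) < j)) ∘ (fun k : Nat => (k : Int)))
      = fun k : Nat => decide (i < k) := by
    funext k; simp
  rw [hcomp, pv_find?_filter]
  have hsplit : List.range nums.length
      = List.range' 0 (i+1) ++ List.range' (i+1) (nums.length - (i+1)) := by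
    rw [List.range_eq_range']
    conv_lhs => rw [show nums.length = (i+1) + (nums.length - (i+1)) by omega]
    rw [← List.range'_append]
    norm_num
  have hdrop : (List.range nums.length).drop (i+1) = List.range' (i+1) (nums.length - (i+1)) := by
    rw [List.range_eq_range', List.drop_range']; congr 1; omega
  rw [hdrop, hsplit, List.find?_append]
  have h1 : (List.range' 0 (i+1)).find? (fun k => P k && decide (i < k)) = none := by
    rw [List.find?_eq_none]
    intro k hk
    rw [List.mem_range'] at hk
    simp only [Bool.and_eq_true, decide_eq_true_eq]
    rintro ⟨-, hik⟩; omega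
  rw [h1, Option.none_or]
  have h2 : (List.range' (i+1) (nums.length - (i+1))).find? (fun k => P k && decide (i < k))
      = (List.range' (i+1) (nums.length - (i+1))).find? P := by
    apply pv_find?_congr
    intro k hk
    rw [List.mem_range'] at hk
    have : i < k := by omega
    simp [this]
  rw [h2]
  cases List.find? P (List.range' (i+1) (nums.length - (i+1))) <;> simp

-- outer loops agree from any start index
theorem pv_outer_eq (nums : List Int) (target : Int) : ∀ i,
    pvB_loop (pvB_groups nums target) target (PySem.List.enumerate (nums.drop i) i)
      = pvA_outer nums target i := by
  intro i
  induction hn : nums.length - i using Nat.strong_induction_on generalizing i with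
  | _ n ih =>
  rw [pvA_outer]
  by_cases hi : i < nums.length
  · have hdrop : nums.drop i = nums.getD i 0 :: nums.drop (i+1) := by
      rw [List.drop_eq_getElem_cons hi, List.getD_eq_getElem?_getD, List.getElem?_eq_getElem hi]
      simp
    rw [hdrop, PySem.List.enumerate_cons, pvB_loop]
    rw [← pv_step_eq nums target i hi]
    have hrec := ih (nums.length - (i+1)) (by omega) (i+1) rfl
    cases hfind : ((pvB_groups nums target).getD (pvB_need target (nums.getD i 0)) []).find?
        (fun j => (i : Int) < j) with
    | none => simp [hi]; exact_mod_cast hrec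
    | some j => simp [hi]
  · have : nums.drop i = [] := List.drop_eq_nil_of_le (by omega)
    simp [hi, this, pvB_loop]

-- ===== VERDICT (by name: the statement is the Claim_ definition above) =====
theorem findPairModZero_spec : Claim_equal_findPairModZero := by
  intro nums target _
  unfold Spec_findPairModZero findPairModZero findPairModZero_alt
  have := pv_outer_eq nums target 0
  simpa using this.symm
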